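-- pv_equiv track=rewrite | github.com/HyeonDeul/acmicpc | not_solved/12143 copy.py | sent
-- ===== SOURCE A (Python) =====
-- def sent(sentences, eng, fran):
--     if not sentences:
--         return len(set(eng) & set(fran))
--     else:
--         sentence = sentences.pop()
--         t_eng = eng[:]
--         t_eng.extend(list(map(str, sentence.split())))
--         t_fran = fran[:]
--         t_fran.extend(list(map(str, sentence.split())))
--         both = min(sent(sentences[:], t_eng, fran),
--                    sent(sentences[:], eng, t_fran))
--         return both
-- ===== SOURCE B (Python) =====
-- def sent(sentences, eng, fran):
--     best = None
--     for mask in range(1 << len(sentences)):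
--         e = set(eng)
--         f = set(fran)
--         m = mask
--         for s in sentences:
--             m, bit = divmod(m, 2)
--             ws = s.split()
--             if bit:
--                 e.update(ws)
--             else:
--                 f.update(ws)
--         v = len(e & f)
--         if best is None or v < best:
--             best = v
--     return best
-- ===== Notes on version B (the rewrite author's own statement) =====
-- stated objective: alternative
-- what changed: Replaces A's branching recursion (pop the last sentence, recurse twice with freshly copied lists, take the min) by a single iterative loop over all 2^n bitmasks that builds both word sets per mask and keeps a running minimum; B does not mutate the caller's sentences list (A pops one element), equivalence is about the return value only.
import Mathlib
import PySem

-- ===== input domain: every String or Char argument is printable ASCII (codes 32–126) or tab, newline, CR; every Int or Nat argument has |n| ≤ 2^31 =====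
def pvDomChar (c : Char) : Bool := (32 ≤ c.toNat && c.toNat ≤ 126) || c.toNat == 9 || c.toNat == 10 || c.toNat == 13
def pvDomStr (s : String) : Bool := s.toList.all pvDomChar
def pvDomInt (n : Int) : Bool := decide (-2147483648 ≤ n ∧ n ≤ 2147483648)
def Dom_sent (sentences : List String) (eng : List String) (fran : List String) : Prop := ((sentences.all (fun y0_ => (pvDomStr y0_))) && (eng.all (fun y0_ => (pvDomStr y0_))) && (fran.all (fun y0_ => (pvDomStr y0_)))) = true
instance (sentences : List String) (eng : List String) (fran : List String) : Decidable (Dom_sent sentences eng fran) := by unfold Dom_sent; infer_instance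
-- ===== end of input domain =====

-- B replaces A's branching recursion (pop last sentence, recurse twice on copied lists) by one
-- iterative loop over all 2^n bitmasks; equivalence is about the RETURN value only (A pops one
-- element off the caller's sentences list; B does not mutate any argument).


-- ===== PORT A =====
def sent (sentences : List String) (eng : List String) (fran : List String) : Int :=
  if h : sentences = [] then
    PySem.Set.len (PySem.Set.inter (PySem.Set.ofList eng) (PySem.Set.ofList fran))
  else
    let sentence := sentences.getLast h
    -- list(map(str, sentence.split())): str is the identity on the str elements
    let words := (PySem.Str.split₀ sentence).map (fun w => w)
    let t_eng := eng ++ words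
    let t_fran := fran ++ words
    min (sent sentences.dropLast t_eng fran) (sent sentences.dropLast eng t_fran)
termination_by sentences.length
decreasing_by
  all_goals
    have := List.length_pos_iff.mpr h
    simp [List.length_dropLast]; omega

-- ===== PORT B =====
-- inner loop of Source B: m, bit = divmod(m, 2); add the words to e or to f according to bit
def sentMaskStep (st : Int × PySem.Set String × PySem.Set String) (s : String) :
    Int × PySem.Set String × PySem.Set String :=
  let m := PySem.Int.floordiv st.1 2
  let bit := PySem.Int.mod st.1 2
  let ws := PySem.Str.split₀ s
  if bit = 1 then (m, PySem.Set.update st.2.1 ws, st.2.2)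
  else (m, st.2.1, PySem.Set.update st.2.2 ws)

-- value computed for one mask: len(e & f) after distributing the words
def sentMaskVal (items eng fran : List String) (mask : Int) : Int :=
  let st := items.foldl sentMaskStep (mask, PySem.Set.ofList eng, PySem.Set.ofList fran)
  PySem.Set.len (PySem.Set.inter st.2.1 st.2.2)

def sent_alt (sentences : List String) (eng : List String) (fran : List String) : Int :=
  let best := (PySem.List.pyRange 0 ((2 : Int) ^ sentences.length) 1).foldl
    (fun (best : Option Int) mask =>
      match best with
      | none => some (sentMaskVal sentences eng fran mask)
      | some b => some (if sentMaskVal sentences eng fran mask < b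
          then sentMaskVal sentences eng fran mask else b))
    none
  best.getD 0   -- range(2**n) is never empty, so best is always set

-- ===== PRECONDITION & SPEC =====
def Spec_sent (sentences : List String) (eng : List String) (fran : List String) (out : Int) : Prop := out = sent_alt sentences eng fran
instance (sentences : List String) (eng : List String) (fran : List String) (out : Int) : Decidable (Spec_sent sentences eng fran out) := by unfold Spec_sent; infer_instance

-- ===== CLAIM (what is proved, stated in full; the proofs are below) =====
def Claim_equal_sent : Prop := ∀ (sentences : List String) (eng : List String) (fran : List String), Dom_sent sentences eng fran → Spec_sent sentences eng fran (sent sentences eng fran)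

-- ===== LEMMAS AND PROOFS =====

-- words of one sentence, as a finite set
def Wset (s : String) : Finset String := (PySem.Str.split₀ s).toFinset

-- abstract branching minimum both programs compute
def gmin : List String → Finset String → Finset String → Int
  | [], E, F => ((E ∩ F).card : Int)
  | s :: rest, E, F => min (gmin rest (E ∪ Wset s) F) (gmin rest E (F ∪ Wset s))

-- leaf value selected by one mask, bits low-to-high along the list
def vmask : List String → Int → Finset String → Finset String → Int
  | [], _, E, F => ((E ∩ F).card : Int)
  | s :: rest, m, E, F =>
      if PySem.Int.mod m 2 = 1 then vmask rest (PySem.Int.floordiv m 2) (E ∪ Wset s) F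
      else vmask rest (PySem.Int.floordiv m 2) E (F ∪ Wset s)

theorem len_inter_eq (e f : PySem.Set String) (he : e.Nodup) :
    PySem.Set.len (PySem.Set.inter e f) = ((e.toFinset ∩ f.toFinset).card : Int) := by
  have h1 : (List.filter (fun x => PySem.Set.contains f x) e).Nodup := he.filter _
  have h2 : (List.filter (fun x => PySem.Set.contains f x) e).toFinset
      = e.toFinset ∩ f.toFinset := by
    ext x
    simp [PySem.Set.contains]
  simp only [PySem.Set.len, PySem.Set.inter, ← h2, List.toFinset_card_of_nodup h1]

theorem toFinset_ofList (xs : List String) :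
    (PySem.Set.ofList xs).toFinset = xs.toFinset := by
  ext x; simp [PySem.Set.mem_ofList]

theorem toFinset_update (s : PySem.Set String) (l : List String) :
    (PySem.Set.update s l).toFinset = s.toFinset ∪ l.toFinset := by
  ext x; simp [PySem.Set.mem_update]

theorem gmin_concat (l : List String) (x : String) (E F : Finset String) :
    gmin (l ++ [x]) E F = min (gmin l (E ∪ Wset x) F) (gmin l E (F ∪ Wset x)) := by
  induction l generalizing E F with
  | nil => rfl
  | cons s l ih =>
      simp only [List.cons_append, gmin, ih]
      rw [Finset.union_right_comm E (Wset s) (Wset x),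
          Finset.union_right_comm F (Wset s) (Wset x)]
      omega

theorem sent_eq_gmin (l eng fran : List String) :
    sent l eng fran = gmin l eng.toFinset fran.toFinset := by
  induction l using List.reverseRecOn generalizing eng fran with
  | nil =>
      rw [sent, dif_pos rfl]
      rw [len_inter_eq _ _ (PySem.Set.nodup_ofList eng), toFinset_ofList, toFinset_ofList]
      rfl
  | append_singleton l x ih =>
      rw [sent, dif_neg (by simp)]
      simp only [List.dropLast_concat, List.map_id']
      rw [ih, ih, gmin_concat]
      simp [Wset, List.toFinset_append]

theorem gmin_le_vmask (items : List String) (m : Int) (E F : Finset String) :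
    gmin items E F ≤ vmask items m E F := by
  induction items generalizing m E F with
  | nil => exact le_refl _
  | cons s rest ih =>
      simp only [gmin, vmask]
      split
      · exact le_trans (min_le_left _ _) (ih _ _ _)
      · exact le_trans (min_le_right _ _) (ih _ _ _)

theorem exists_mask (items : List String) (E F : Finset String) :
    ∃ m : Int, 0 ≤ m ∧ m < 2 ^ items.length ∧ vmask items m E F = gmin items E F := by
  induction items generalizing E F with
  | nil => exact ⟨0, by norm_num, by norm_num, rfl⟩
  | cons s rest ih =>
      rcases le_total (gmin rest (E ∪ Wset s) F) (gmin rest E (F ∪ Wset s)) with h | h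
      · obtain ⟨m, hm0, hmlt, hv⟩ := ih (E ∪ Wset s) F
        refine ⟨2 * m + 1, by omega, ?_, ?_⟩
        · have : (2:Int) ^ (s :: rest).length = 2 * 2 ^ rest.length := by
            simp [List.length_cons, pow_succ]; ring
          omega
        · have hmod : PySem.Int.mod (2 * m + 1) 2 = 1 := by
            rw [PySem.Int.mod_eq_emod_of_pos (by norm_num)]; omega
          have hdiv : PySem.Int.floordiv (2 * m + 1) 2 = m := by
            rw [PySem.Int.floordiv_eq_ediv_of_pos (by norm_num)]; omega
          simp only [vmask, hmod, hdiv, hv, gmin]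
          exact (min_eq_left h).symm
      · obtain ⟨m, hm0, hmlt, hv⟩ := ih E (F ∪ Wset s)
        refine ⟨2 * m, by omega, ?_, ?_⟩
        · have : (2:Int) ^ (s :: rest).length = 2 * 2 ^ rest.length := by
            simp [List.length_cons, pow_succ]; ring
          omega
        · have hmod : PySem.Int.mod (2 * m) 2 = 0 := by
            rw [PySem.Int.mod_eq_emod_of_pos (by norm_num)]; omega
          have hdiv : PySem.Int.floordiv (2 * m) 2 = m := by
            rw [PySem.Int.floordiv_eq_ediv_of_pos (by norm_num)]; omega
          simp only [vmask, hmod, hdiv]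
          rw [if_neg (by norm_num), hv, gmin]
          exact (min_eq_right h).symm

theorem sentMaskVal_eq_vmask_aux (items : List String) (m : Int) (e f : PySem.Set String)
    (he : e.Nodup) (hf : f.Nodup) :
    PySem.Set.len (PySem.Set.inter (items.foldl sentMaskStep (m, e, f)).2.1
      (items.foldl sentMaskStep (m, e, f)).2.2)
      = vmask items m e.toFinset f.toFinset := by
  induction items generalizing m e f with
  | nil => exact len_inter_eq e f he
  | cons s rest ih =>
      simp only [List.foldl_cons, vmask]
      by_cases hb : PySem.Int.mod m 2 = 1
      · rw [if_pos hb]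
        have hstep : sentMaskStep (m, e, f) s
            = (PySem.Int.floordiv m 2, PySem.Set.update e (PySem.Str.split₀ s), f) := by
          simp only [sentMaskStep]; rw [if_pos hb]
        rw [hstep, ih _ _ _ (PySem.Set.nodup_update _ _ he) hf, toFinset_update]
        rfl
      · rw [if_neg hb]
        have hstep : sentMaskStep (m, e, f) s
            = (PySem.Int.floordiv m 2, e, PySem.Set.update f (PySem.Str.split₀ s)) := by
          simp only [sentMaskStep]; rw [if_neg hb]
        rw [hstep, ih _ _ _ he (PySem.Set.nodup_update _ _ hf), toFinset_update]
        rfl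

theorem sentMaskVal_eq_vmask (items eng fran : List String) (m : Int) :
    sentMaskVal items eng fran m = vmask items m eng.toFinset fran.toFinset := by
  rw [sentMaskVal]
  rw [sentMaskVal_eq_vmask_aux _ _ _ _ (PySem.Set.nodup_ofList eng) (PySem.Set.nodup_ofList fran)]
  rw [toFinset_ofList, toFinset_ofList]

-- B's Option-accumulator loop, once started, is a plain running minimum
theorem foldl_opt_min (val : Int → Int) (l : List Int) (b : Int) :
    l.foldl (fun (best : Option Int) mask =>
        match best with
        | none => some (val mask)
        | some b => some (if val mask < b then val mask else b)) (some b)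
      = some ((l.map val).foldl min b) := by
  induction l generalizing b with
  | nil => rfl
  | cons m l ih =>
      simp only [List.foldl_cons, List.map_cons, ih]
      congr 1
      congr 1
      rcases lt_or_ge (val m) b with h | h
      · rw [if_pos h, min_eq_right h.le]
      · rw [if_neg (not_lt.mpr h), min_eq_left h]

theorem sent_alt_eq_gmin (sentences eng fran : List String) :
    sent_alt sentences eng fran = gmin sentences eng.toFinset fran.toFinset := by
  have hpos : (0 : Int) < 2 ^ sentences.length := by positivity
  rw [sent_alt]
  rw [PySem.List.pyRange_one_cons hpos]
  simp only [List.foldl_cons]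
  rw [foldl_opt_min (sentMaskVal sentences eng fran)]
  simp only [Option.getD_some]
  set R := PySem.List.pyRange (0 + 1) (2 ^ sentences.length) 1 with hR
  set val : Int → Int := sentMaskVal sentences eng fran with hval
  set x := (R.map val).foldl min (val 0) with hx
  have hle := PySem.List.foldl_min_le (R.map val) (val 0)
  have hmem := PySem.List.foldl_min_mem (R.map val) (val 0)
  -- x is attained at some mask in [0, 2^n)
  have hattain : ∃ m : Int, 0 ≤ m ∧ m < 2 ^ sentences.length ∧ x = val m := by
    rcases hmem with h | h
    · exact ⟨0, le_refl 0, hpos, h⟩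
    · obtain ⟨m, hmR, hmv⟩ := List.mem_map.mp h
      have := PySem.List.mem_pyRange_one.mp hmR
      exact ⟨m, by omega, by omega, hmv.symm⟩
  obtain ⟨m, hm0, hmlt, hxm⟩ := hattain
  -- x is a lower bound of val on [0, 2^n)
  obtain ⟨mw, hw0, hwlt, hwv⟩ := exists_mask sentences eng.toFinset fran.toFinset
  apply le_antisymm
  · -- x ≤ val mw = gmin
    have hwmem : val mw ∈ R.map val ∨ mw = 0 := by
      rcases eq_or_lt_of_le hw0 with h0 | h0
      · exact Or.inr h0.symm
      · exact Or.inl (List.mem_map.mpr ⟨mw,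
          PySem.List.mem_pyRange_one.mpr (by omega), rfl⟩)
    rcases hwmem with h | h
    · calc x ≤ val mw := hle.2 _ h
        _ = _ := by rw [hval, sentMaskVal_eq_vmask, hwv]
    · calc x ≤ val 0 := hle.1
        _ = _ := by rw [hval, ← h, sentMaskVal_eq_vmask, hwv]
  · rw [hxm, hval, sentMaskVal_eq_vmask]
    exact gmin_le_vmask sentences m eng.toFinset fran.toFinset

-- ===== VERDICT (by name: the statement is the Claim_ definition above) =====
theorem sent_spec : Claim_equal_sent := by
  intro sentences eng fran _
  unfold Spec_sent
  rw [sent_eq_gmin, sent_alt_eq_gmin]
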